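-- pv_equiv track=rewrite | github.com/PlagaMedicum/TranslationZed-py | translationzed_py/core/tmx_io.py | _resolve_csv_column_indexes
-- ===== SOURCE A (Python) =====
-- _CSV_SOURCE_HEADERS = frozenset(
--     {
--         "source",
--         "src",
--         "original",
--         "source_text",
--         "source text",
--         "en",
--     }
-- )
--
-- _CSV_TARGET_HEADERS = frozenset(
--     {
--         "target",
--         "trg",
--         "translation",
--         "translated",
--         "target_text",
--         "target text",
--     }
-- )
--
-- def _resolve_csv_column_indexes(row: list[str]) -> tuple[int, int, bool]:
--     """Resolve csv column indexes."""
--     if not row: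
--         return 0, 1, False
--     normalized = [_normalize_csv_header(cell) for cell in row]
--     source_idx = _find_csv_header_index(normalized, _CSV_SOURCE_HEADERS)
--     target_idx = _find_csv_header_index(normalized, _CSV_TARGET_HEADERS)
--     has_header = source_idx is not None or target_idx is not None
--     if source_idx is None:
--         source_idx = 0
--     if target_idx is None:
--         target_idx = 1 if source_idx == 0 else 0
--     if target_idx == source_idx and len(row) > 1:
--         target_idx = 1 if source_idx == 0 else 0
--     return source_idx, target_idx, has_header
--
-- def _normalize_csv_header(value: str) -> str:
--     """Normalize csv header."""
--     return value.strip().lower().replace("-", "_")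
--
-- def _find_csv_header_index(row: list[str], labels: frozenset[str]) -> int | None:
--     """Find csv header index."""
--     for idx, value in enumerate(row):
--         if value in labels:
--             return idx
--     return None
-- ===== SOURCE B (Python) =====
-- _CSV_SOURCE_HEADERS = frozenset(
--     {"source", "src", "original", "source_text", "source text", "en"}
-- )
--
-- _CSV_TARGET_HEADERS = frozenset(
--     {"target", "trg", "translation", "translated", "target_text", "target text"}
-- )
--
--
-- def _resolve_csv_column_indexes(row: list[str]) -> tuple[int, int, bool]:
--     """Resolve csv column indexes (single fused scan, early exit)."""
--     if not row:
--         return 0, 1, False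
--     src = trg = None
--     for idx, cell in enumerate(row):
--         label = cell.strip().lower().replace("-", "_")
--         if src is None and label in _CSV_SOURCE_HEADERS:
--             src = idx
--         if trg is None and label in _CSV_TARGET_HEADERS:
--             trg = idx
--         if src is not None and trg is not None:
--             break
--     has_header = src is not None or trg is not None
--     if src is None:
--         src = 0
--     if trg is None or (trg == src and len(row) > 1):
--         trg = 1 if src == 0 else 0
--     return src, trg, has_header
-- ===== Notes on version B (the rewrite author's own statement) =====
-- stated objective: alternative
-- what changed: A builds a normalized copy of the row and then runs two separate scans (one per label set); B does a single fused pass that normalizes each cell once, tracks the first source and first target match simultaneously and exits early once both are found, then folds the two fallback steps for target into one condition.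
import Mathlib
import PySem

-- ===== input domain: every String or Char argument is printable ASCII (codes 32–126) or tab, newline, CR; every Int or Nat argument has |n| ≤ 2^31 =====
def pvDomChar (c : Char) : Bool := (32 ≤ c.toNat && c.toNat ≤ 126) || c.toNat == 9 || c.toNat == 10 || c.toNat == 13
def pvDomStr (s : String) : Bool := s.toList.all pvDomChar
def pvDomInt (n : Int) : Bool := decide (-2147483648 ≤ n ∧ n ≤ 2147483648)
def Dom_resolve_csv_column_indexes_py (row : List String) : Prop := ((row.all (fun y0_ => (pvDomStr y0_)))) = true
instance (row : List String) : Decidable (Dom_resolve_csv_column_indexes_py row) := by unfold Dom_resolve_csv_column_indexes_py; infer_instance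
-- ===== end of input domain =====

-- B replaces A's normalized-list construction plus two separate header scans by one
-- fused single pass with early exit (objective: alternative/simpler traversal).

-- ===== PORT A =====
def csvSourceHeaders : List String :=
  ["source", "src", "original", "source_text", "source text", "en"]

def csvTargetHeaders : List String :=
  ["target", "trg", "translation", "translated", "target_text", "target text"]

def normalizeCsvHeader (value : String) : String :=
  PySem.Str.replace (PySem.Str.lower (PySem.Str.strip value)) "-" "_"

def findCsvHeaderIndex (row : List String) (labels : List String) (idx : Int) : Option Int :=
  match row with
  | [] => none
  | v :: rest => if labels.contains v then some idx else findCsvHeaderIndex rest labels (idx + 1)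

def resolve_csv_column_indexes_py (row : List String) : Int × Int × Bool :=
  if row = [] then (0, 1, false)
  else
    let normalized := row.map normalizeCsvHeader
    let sOpt := findCsvHeaderIndex normalized csvSourceHeaders 0
    let tOpt := findCsvHeaderIndex normalized csvTargetHeaders 0
    let hasHeader := sOpt.isSome || tOpt.isSome
    let s := match sOpt with | none => 0 | some i => i
    let t := match tOpt with | none => if s = 0 then 1 else 0 | some i => i
    let t := if t = s ∧ 1 < row.length then (if s = 0 then 1 else 0) else t
    (s, t, hasHeader)

-- ===== PORT B =====
-- fused scan: one pass, normalizing each cell once, tracking both first matches; breaks when both found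
def csvScan (row : List String) (idx : Int) (src trg : Option Int) : Option Int × Option Int :=
  match row with
  | [] => (src, trg)
  | cell :: rest =>
    let label := PySem.Str.replace (PySem.Str.lower (PySem.Str.strip cell)) "-" "_"
    let src' := if src.isNone && csvSourceHeaders.contains label then some idx else src
    let trg' := if trg.isNone && csvTargetHeaders.contains label then some idx else trg
    if src'.isSome && trg'.isSome then (src', trg')
    else csvScan rest (idx + 1) src' trg'

def resolve_csv_column_indexes_py_alt (row : List String) : Int × Int × Bool :=
  if row = [] then (0, 1, false)
  else
    let st := csvScan row 0 none none
    let hasHeader := st.1.isSome || st.2.isSome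
    let src := match st.1 with | none => 0 | some i => i
    let trg :=
      match st.2 with
      | none => if src = 0 then 1 else 0
      | some i => if i = src ∧ 1 < row.length then (if src = 0 then 1 else 0) else i
    (src, trg, hasHeader)

-- ===== PRECONDITION & SPEC =====
def Spec_resolve_csv_column_indexes_py (row : List String) (out : Int × Int × Bool) : Prop := out = resolve_csv_column_indexes_py_alt row
instance (row : List String) (out : Int × Int × Bool) : Decidable (Spec_resolve_csv_column_indexes_py row out) := by unfold Spec_resolve_csv_column_indexes_py; infer_instance

-- ===== CLAIM (what is proved, stated in full; the proofs are below) =====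
def Claim_equal_resolve_csv_column_indexes_py : Prop := ∀ (row : List String), Dom_resolve_csv_column_indexes_py row → Spec_resolve_csv_column_indexes_py row (resolve_csv_column_indexes_py row)

-- ===== LEMMAS AND PROOFS =====

lemma csvScan_eq (row : List String) : ∀ (idx : Int) (src trg : Option Int),
    csvScan row idx src trg =
      ((match src with
        | some i => some i
        | none => findCsvHeaderIndex (row.map normalizeCsvHeader) csvSourceHeaders idx),
       (match trg with
        | some i => some i
        | none => findCsvHeaderIndex (row.map normalizeCsvHeader) csvTargetHeaders idx)) := by
  induction row with
  | nil =>
    intro idx src trg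
    cases src <;> cases trg <;> simp [csvScan, findCsvHeaderIndex]
  | cons cell rest ih =>
    intro idx src trg
    simp only [csvScan, List.map, findCsvHeaderIndex, normalizeCsvHeader]
    cases src <;> cases trg <;>
      simp only [Option.isNone, Option.isSome, Bool.true_and, Bool.false_and] <;>
      split_ifs <;>
      simp_all

theorem resolve_csv_column_indexes_py_spec : Claim_equal_resolve_csv_column_indexes_py := by
  intro row _
  unfold Spec_resolve_csv_column_indexes_py
  unfold resolve_csv_column_indexes_py resolve_csv_column_indexes_py_alt
  by_cases h : row = []
  · simp [h]
  · simp only [h, if_false, csvScan_eq]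
    cases hs : findCsvHeaderIndex (row.map normalizeCsvHeader) csvSourceHeaders 0 <;>
    cases ht : findCsvHeaderIndex (row.map normalizeCsvHeader) csvTargetHeaders 0 <;>
      simp only [] <;> split_ifs <;> simp_all
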